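-- pv_equiv track=rewrite | github.com/Chencx901/checkio | long-repeat.py | long_repeat
-- ===== SOURCE A (Python) =====
-- def long_repeat(line):
--     """
--         length the longest substring that consists of the same char
--     """
--     # your code here
--     if len(line) == 0:
--         return 0
--     else:
--         l = [i for i in line]
--         l_1 = set(l)
--         result = {}
--         for i in l_1:
--             result[i] = 1
--             for j in range(len(l)-1):
--                 if l[j] == i and l[j+1] == i:
--                     result[i] += 1
--         return max(result.values())
-- ===== SOURCE B (Python) =====
-- def long_repeat(line):
--     """
--         length the longest substring that consists of the same char
--     """
--     # Single pass: count, per char, the adjacent equal pairs; answer is max + 1.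
--     if not line:
--         return 0
--     counts = {}
--     prev = None
--     for ch in line:
--         counts[ch] = counts.get(ch, 0) + (1 if ch == prev else 0)
--         prev = ch
--     return max(counts.values()) + 1
-- ===== Notes on version B (the rewrite author's own statement) =====
-- stated objective: faster
-- what changed: Replaces A's per-distinct-char rescans of the whole string (set + nested loop) by one single pass that keeps a running counter of adjacent equal pairs per char, then takes max+1.
import Mathlib
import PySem

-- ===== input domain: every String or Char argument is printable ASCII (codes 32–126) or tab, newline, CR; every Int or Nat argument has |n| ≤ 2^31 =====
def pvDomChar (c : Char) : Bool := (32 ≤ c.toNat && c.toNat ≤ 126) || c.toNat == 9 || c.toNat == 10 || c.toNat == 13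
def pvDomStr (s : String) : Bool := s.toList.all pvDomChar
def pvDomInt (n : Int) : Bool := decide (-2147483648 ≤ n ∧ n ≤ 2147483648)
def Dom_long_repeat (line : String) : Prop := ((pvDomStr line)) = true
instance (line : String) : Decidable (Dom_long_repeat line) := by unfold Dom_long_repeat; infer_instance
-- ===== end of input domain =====

-- B replaces A's per-distinct-char rescans of the string by one single counting pass (objective: faster).

-- ===== PORT A =====
-- A iterates over a Python set; the dict it builds is consumed only by max over its
-- values, which does not depend on iteration order, so Set.ofList's order is sound here.
-- `result[i] += 1` always finds the key i (inserted just before), so it is ported as modify.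
def long_repeat (line : String) : Int :=
  let l := line.toList
  if l.length = 0 then 0
  else
    let l1 : PySem.Set Char := PySem.Set.ofList l
    let result : PySem.Dict Char Int :=
      l1.foldl (fun d i =>
        ((PySem.List.pyRange 0 ((l.length : Int) - 1) 1).foldl (fun d j =>
          if PySem.List.pyGetD l j ' ' = i ∧ PySem.List.pyGetD l (j + 1) ' ' = i then
            d.modify i 0 (· + 1)
          else d) (d.insert i 1))) PySem.Dict.empty
    -- max(result.values()): result is nonempty here (l1 ≠ []), so the none arm is unreachable
    match PySem.List.max? result.values (fun v => v) with
    | some v => v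
    | none => 0

-- ===== PORT B =====
def long_repeat_alt (line : String) : Int :=
  if line.toList = [] then 0
  else
    let st := line.toList.foldl
      (fun (p : PySem.Dict Char Int × Option Char) ch =>
        (p.1.insert ch (p.1.getD ch 0 + (if some ch = p.2 then 1 else 0)), some ch))
      (PySem.Dict.empty, none)
    match PySem.List.max? st.1.values (fun v => v) with
    | some v => v + 1
    | none => 0

-- ===== PRECONDITION & SPEC =====
def Spec_long_repeat (line : String) (out : Int) : Prop := out = long_repeat_alt line
instance (line : String) (out : Int) : Decidable (Spec_long_repeat line out) := by unfold Spec_long_repeat; infer_instance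

-- ===== CLAIM (what is proved, stated in full; the proofs are below) =====
def Claim_equal_long_repeat : Prop := ∀ (line : String), Dom_long_repeat line → Spec_long_repeat line (long_repeat line)

-- ===== LEMMAS AND PROOFS =====

-- number of adjacent equal pairs of the char c in a list
def adjCnt (c : Char) : List Char → Int
  | a :: b :: t => (if a = c ∧ b = c then 1 else 0) + adjCnt c (b :: t)
  | _ => 0

-- A's inner loop: starting from d, only the key i changes, by +count of the hits
lemma innerA_getD (l : List Char) (lst : List Int) (i : Char) (d : PySem.Dict Char Int) :
    (lst.foldl (fun d j =>
      if PySem.List.pyGetD l j ' ' = i ∧ PySem.List.pyGetD l (j + 1) ' ' = i then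
        d.modify i 0 (· + 1)
      else d) d).getD i 0
    = d.getD i 0 + (lst.countP (fun j => decide (PySem.List.pyGetD l j ' ' = i ∧ PySem.List.pyGetD l (j + 1) ' ' = i)) : Int) := by
  induction lst generalizing d with
  | nil => simp
  | cons j t ih =>
    simp only [List.foldl_cons, List.countP_cons]
    by_cases h : PySem.List.pyGetD l j ' ' = i ∧ PySem.List.pyGetD l (j + 1) ' ' = i
    · rw [if_pos h, ih, PySem.Dict.getD_modify_self]; simp [h]; ring
    · rw [if_neg h, ih]; simp [h]

lemma innerA_getD_ne (l : List Char) (lst : List Int) (i c : Char) (hne : c ≠ i) (d : PySem.Dict Char Int) :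
    (lst.foldl (fun d j =>
      if PySem.List.pyGetD l j ' ' = i ∧ PySem.List.pyGetD l (j + 1) ' ' = i then
        d.modify i 0 (· + 1)
      else d) d).getD c 0 = d.getD c 0 := by
  induction lst generalizing d with
  | nil => rfl
  | cons j t ih =>
    simp only [List.foldl_cons]
    split_ifs with h
    · rw [ih]; exact PySem.Dict.getD_modify_of_ne d 0 _ hne
    · exact ih d

-- single insert appends the key as a set-add
lemma keysInsertAdd (d : PySem.Dict Char Int) (i : Char) (v : Int) :
    (d.insert i v).keys = PySem.Set.add d.keys i := by
  by_cases h : d.contains i = true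
  · rw [PySem.Dict.keys_insert_of_contains d v h,
      PySem.Set.add_of_mem ((PySem.Dict.contains_iff_mem_keys d i).mp h)]
  · rw [PySem.Dict.keys_insert_of_not_contains d v (by simpa using h),
      PySem.Set.add_of_not_mem (fun hm => h ((PySem.Dict.contains_iff_mem_keys d i).mpr hm))]

lemma innerA_keys (l : List Char) (lst : List Int) (i : Char) (d : PySem.Dict Char Int)
    (hi : i ∈ d.keys) :
    (lst.foldl (fun d j =>
      if PySem.List.pyGetD l j ' ' = i ∧ PySem.List.pyGetD l (j + 1) ' ' = i then
        d.modify i 0 (· + 1)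
      else d) d).keys = d.keys := by
  induction lst generalizing d with
  | nil => rfl
  | cons j t ih =>
    simp only [List.foldl_cons]
    have hmk : (d.modify i 0 (· + 1)).keys = d.keys := by
      rw [PySem.Dict.keys_modify, keysInsertAdd, PySem.Set.add_of_mem hi]
    split_ifs with h
    · rw [ih _ (by rw [hmk]; exact hi), hmk]
    · exact ih d hi

-- indexing a cons at a successor index
lemma pyGetD_cons_succ (x : Char) (xs : List Char) (k : Nat) (d : Char) :
    PySem.List.pyGetD (x :: xs) ((k + 1 : Nat) : Int) d = PySem.List.pyGetD xs (k : Int) d := by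
  rw [PySem.List.pyGetD_natCast, PySem.List.pyGetD_natCast]; simp

-- the index-based pair count equals the structural one
lemma countP_range_adj (l : List Char) (c : Char) :
    ((List.range (l.length - 1)).countP
      (fun (k : Nat) => decide (PySem.List.pyGetD l (k : Int) ' ' = c ∧ PySem.List.pyGetD l ((k : Int) + 1) ' ' = c)) : Int)
    = adjCnt c l := by
  induction l with
  | nil => rfl
  | cons a t ih =>
    cases t with
    | nil => rfl
    | cons b t2 =>
      have hlen : (a :: b :: t2).length - 1 = ((b :: t2).length - 1) + 1 := by simp
      rw [hlen, List.range_succ_eq_map, List.countP_cons, List.countP_map]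
      have hc : (List.range ((b :: t2).length - 1)).countP
            ((fun (k : Nat) => decide (PySem.List.pyGetD (a :: b :: t2) (k : Int) ' ' = c ∧
              PySem.List.pyGetD (a :: b :: t2) ((k : Int) + 1) ' ' = c)) ∘ (fun k => k + 1))
          = (List.range ((b :: t2).length - 1)).countP
            (fun (k : Nat) => decide (PySem.List.pyGetD (b :: t2) (k : Int) ' ' = c ∧
              PySem.List.pyGetD (b :: t2) ((k : Int) + 1) ' ' = c)) := by
        apply List.countP_congr
        intro k _
        simp only [Function.comp_def]
        have e1 : PySem.List.pyGetD (a :: b :: t2) ((k + 1 : Nat) : Int) ' '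
            = PySem.List.pyGetD (b :: t2) (k : Int) ' ' := pyGetD_cons_succ a (b :: t2) k ' '
        have e2 : PySem.List.pyGetD (a :: b :: t2) (((k + 1 : Nat) : Int) + 1) ' '
            = PySem.List.pyGetD (b :: t2) ((k : Int) + 1) ' ' := by
          have h2 : (((k + 1 : Nat) : Int) + 1) = ((k + 2 : Nat) : Int) := by push_cast; ring
          have h3 : ((k : Int) + 1) = ((k + 1 : Nat) : Int) := by push_cast; ring
          rw [h2, h3, pyGetD_cons_succ a (b :: t2) (k + 1) ' ']
        rw [e1, e2]
      rw [hc]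
      have h0 : PySem.List.pyGetD (a :: b :: t2) ((0 : Nat) : Int) ' ' = a := by
        rw [PySem.List.pyGetD_natCast]; rfl
      have h1 : PySem.List.pyGetD (a :: b :: t2) (((0 : Nat) : Int) + 1) ' ' = b := by
        have : (((0 : Nat) : Int) + 1) = ((1 : Nat) : Int) := by norm_num
        rw [this, PySem.List.pyGetD_natCast]; rfl
      rw [h0, h1,
        show adjCnt c (a :: b :: t2) = (if a = c ∧ b = c then 1 else 0) + adjCnt c (b :: t2) from rfl,
        ← ih]
      by_cases h : a = c ∧ b = c
      · simp [h]; ring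
      · simp [h]

-- A's outer loop: steps for other keys do not touch the key c
lemma outerA_skip (l : List Char) (t : List Char) (c : Char) (hnotin : c ∉ t)
    (d : PySem.Dict Char Int) :
    (t.foldl (fun d i =>
      ((PySem.List.pyRange 0 ((l.length : Int) - 1) 1).foldl (fun d j =>
        if PySem.List.pyGetD l j ' ' = i ∧ PySem.List.pyGetD l (j + 1) ' ' = i then
          d.modify i 0 (· + 1)
        else d) (d.insert i 1))) d).getD c 0 = d.getD c 0 := by
  induction t generalizing d with
  | nil => rfl
  | cons u v ihh =>
    have hcu : c ≠ u := fun h => hnotin (h ▸ List.mem_cons_self)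
    have hcv : c ∉ v := fun h => hnotin (List.mem_cons_of_mem u h)
    simp only [List.foldl_cons]
    rw [ihh hcv, innerA_getD_ne l _ u c hcu, PySem.Dict.getD_insert_of_ne d 1 0 hcu]

-- the pyRange A loops over, as a mapped List.range
lemma pyRange_len (l : List Char) :
    PySem.List.pyRange 0 ((l.length : Int) - 1) 1
      = (List.range (l.length - 1)).map (fun k : Nat => (k : Int)) := by
  rw [PySem.List.pyRange_one]
  have h1 : ((l.length : Int) - 1 - 0).toNat = l.length - 1 := by omega
  rw [h1]
  simp only [zero_add]

-- A's outer loop over the distinct chars: final lookup of any processed key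
lemma outerA_getD (l : List Char) (s : List Char) (c : Char) (hc : c ∈ s) (hnd : s.Nodup)
    (d : PySem.Dict Char Int) :
    (s.foldl (fun d i =>
      ((PySem.List.pyRange 0 ((l.length : Int) - 1) 1).foldl (fun d j =>
        if PySem.List.pyGetD l j ' ' = i ∧ PySem.List.pyGetD l (j + 1) ' ' = i then
          d.modify i 0 (· + 1)
        else d) (d.insert i 1))) d).getD c 0
    = 1 + adjCnt c l := by
  induction s generalizing d with
  | nil => cases hc
  | cons i t ih =>
    simp only [List.foldl_cons]
    rcases List.mem_cons.mp hc with h | h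
    · subst h
      rw [outerA_skip l t c (List.nodup_cons.mp hnd).1]
      rw [innerA_getD, PySem.Dict.getD_insert_self]
      rw [pyRange_len, List.countP_map]
      simp only [Function.comp_def]
      rw [countP_range_adj l c]
    · exact ih h (List.nodup_cons.mp hnd).2 _

lemma outerA_keys (l : List Char) (s : List Char) (d : PySem.Dict Char Int) :
    (s.foldl (fun d i =>
      ((PySem.List.pyRange 0 ((l.length : Int) - 1) 1).foldl (fun d j =>
        if PySem.List.pyGetD l j ' ' = i ∧ PySem.List.pyGetD l (j + 1) ' ' = i then
          d.modify i 0 (· + 1)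
        else d) (d.insert i 1))) d).keys = PySem.Set.update d.keys s := by
  induction s generalizing d with
  | nil => rfl
  | cons i t ih =>
    simp only [List.foldl_cons]
    rw [ih, innerA_keys l _ i _ ((PySem.Dict.mem_keys_insert d i i 1).mpr (Or.inl rfl)),
      keysInsertAdd]
    rfl

-- B's loop invariant: the dict accumulates the adjacent-pair counts, prev tracks the last char
lemma loopB_getD (t : List Char) (p : Char) (d : PySem.Dict Char Int) (c : Char) :
    ((t.foldl
      (fun (p : PySem.Dict Char Int × Option Char) ch =>
        (p.1.insert ch (p.1.getD ch 0 + (if some ch = p.2 then 1 else 0)), some ch))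
      (d, some p)).1).getD c 0
    = d.getD c 0 + adjCnt c (p :: t) := by
  induction t generalizing d p with
  | nil => simp [adjCnt]
  | cons b t2 ih =>
    simp only [List.foldl_cons]
    rw [ih]
    rw [PySem.Dict.getD_insert]
    show _ = d.getD c 0 + ((if p = c ∧ b = c then 1 else 0) + adjCnt c (b :: t2))
    by_cases hcb : c = b
    · subst hcb
      rw [if_pos rfl]
      by_cases hcp : c = p
      · subst hcp
        rw [if_pos rfl, if_pos ⟨rfl, rfl⟩]
        ring
      · rw [if_neg (by simp [hcp]), if_neg (fun h => hcp h.1.symm)]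
        ring
    · rw [if_neg hcb, if_neg (fun h => hcb h.2.symm)]
      ring

lemma loopB_keys (t : List Char) (po : Option Char) (d : PySem.Dict Char Int) :
    ((t.foldl
      (fun (p : PySem.Dict Char Int × Option Char) ch =>
        (p.1.insert ch (p.1.getD ch 0 + (if some ch = p.2 then 1 else 0)), some ch))
      (d, po)).1).keys = PySem.Set.update d.keys t := by
  induction t generalizing d po with
  | nil => rfl
  | cons b t2 ih =>
    simp only [List.foldl_cons]
    rw [ih, keysInsertAdd]
    rfl

-- building a set by adds over fresh elements just appends them
lemma foldl_add_of_nodup (t acc : List Char) (h : (acc ++ t).Nodup) :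
    t.foldl PySem.Set.add acc = acc ++ t := by
  induction t generalizing acc with
  | nil => simp
  | cons a t2 ih =>
    have ha : a ∉ acc := fun hm => (List.nodup_append.mp h).2.2 a hm a List.mem_cons_self rfl
    simp only [List.foldl_cons]
    rw [PySem.Set.add_of_not_mem ha, ih (acc ++ [a]) (by simpa using h)]
    simp

-- Set.ofList of a list with no duplicates is that list
lemma ofList_of_nodup (s : List Char) (h : s.Nodup) : PySem.Set.ofList s = s := by
  rw [PySem.Set.ofList_eq_foldl, foldl_add_of_nodup s [] (by simpa using h)]
  simp

-- max over a +1-shifted nonempty list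
lemma foldl_max_add_one (ys : List Int) (a : Int) :
    (ys.map (fun v => v + 1)).foldl max (a + 1) = ys.foldl max a + 1 := by
  induction ys generalizing a with
  | nil => rfl
  | cons y t ih =>
    simp only [List.map_cons, List.foldl_cons]
    rw [show max (a + 1) (y + 1) = max a y + 1 by omega]
    exact ih _

-- ===== VERDICT (by name: the statement is the Claim_ definition above) =====
theorem long_repeat_spec : Claim_equal_long_repeat := by
  intro line _
  unfold Spec_long_repeat long_repeat long_repeat_alt
  cases hl : line.toList with
  | nil => simp
  | cons a t =>
    simp only []
    rw [if_neg (by simp), if_neg (by simp)]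
    set l := a :: t with hldef
    set s : List Char := PySem.Set.ofList l with hs
    have hsnodup : s.Nodup := PySem.Set.nodup_ofList l
    -- A's dict: keys are s, value at c is 1 + adjCnt c l
    have hAkeys : (s.foldl (fun d i =>
        ((PySem.List.pyRange 0 ((l.length : Int) - 1) 1).foldl (fun d j =>
          if PySem.List.pyGetD l j ' ' = i ∧ PySem.List.pyGetD l (j + 1) ' ' = i then
            d.modify i 0 (· + 1)
          else d) (d.insert i 1))) (PySem.Dict.empty : PySem.Dict Char Int)).keys = s := by
      refine (outerA_keys l s PySem.Dict.empty).trans ?_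
      show PySem.Set.ofList s = s
      exact ofList_of_nodup s hsnodup
    have hAvals : (s.foldl (fun d i =>
        ((PySem.List.pyRange 0 ((l.length : Int) - 1) 1).foldl (fun d j =>
          if PySem.List.pyGetD l j ' ' = i ∧ PySem.List.pyGetD l (j + 1) ' ' = i then
            d.modify i 0 (· + 1)
          else d) (d.insert i 1))) (PySem.Dict.empty : PySem.Dict Char Int)).values
        = s.map (fun c => adjCnt c l + 1) := by
      rw [PySem.Dict.values_eq_map_keys _ (by rw [hAkeys]; exact hsnodup) 0, hAkeys]
      apply List.map_congr_left
      intro c hcs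
      rw [outerA_getD l s c hcs hsnodup]
      ring
    -- B's dict: keys are s, value at c is adjCnt c l
    have hBkeys : ((l.foldl
        (fun (p : PySem.Dict Char Int × Option Char) ch =>
          (p.1.insert ch (p.1.getD ch 0 + (if some ch = p.2 then 1 else 0)), some ch))
        (PySem.Dict.empty, none)).1).keys = s := by
      rw [loopB_keys]
      rfl
    have hBvals : ((l.foldl
        (fun (p : PySem.Dict Char Int × Option Char) ch =>
          (p.1.insert ch (p.1.getD ch 0 + (if some ch = p.2 then 1 else 0)), some ch))
        (PySem.Dict.empty, none)).1).values
        = s.map (fun c => adjCnt c l) := by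
      rw [PySem.Dict.values_eq_map_keys _ (by rw [hBkeys]; exact hsnodup) 0, hBkeys]
      apply List.map_congr_left
      intro c hcs
      rw [hldef, List.foldl_cons]
      rw [loopB_getD t a _ c]
      rw [PySem.Dict.getD_insert]
      by_cases h : c = a
      · rw [if_pos h]
        simp
      · rw [if_neg h]
        simp
    rw [hAvals, hBvals]
    -- s is nonempty: a ∈ s
    cases hsc : s with
    | nil =>
      exfalso
      have : a ∈ s := by rw [hs]; exact (PySem.Set.mem_ofList l a).mpr (by simp [hldef])
      rw [hsc] at this; cases this
    | cons c0 srest =>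
      simp only [List.map_cons]
      rw [PySem.List.max?_id_cons, PySem.List.max?_id_cons]
      simp only []
      have : (srest.map (fun c => adjCnt c l + 1)) = (srest.map (fun c => adjCnt c l)).map (fun v => v + 1) := by
        rw [List.map_map]; rfl
      rw [this, foldl_max_add_one]
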